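-- pv_equiv track=rewrite | github.com/2975459755/cs61a_su2019 | projects/typing_test/typing_test.py | find
-- ===== SOURCE A (Python) =====
-- def find(w1, w2, f = True):
--     l1, l2 = len(w1), len(w2)
--     if w1 in w2:
--         return True
--     elif l1 > l2 and f:
--         return find(w2, w1, False)
--     elif l1 == l2 or l2 <= 2:
--         return False
--     else:
--         i = 1
--         while i < l2 and w1[0] != w2[i]:
--             i += 1
--         return i != l2 and find(w1[1:], w2[i+1:], False)
-- ===== SOURCE B (Python) =====
-- def find(w1, w2, f=True):
--     # one-time swap replaces the recursive re-entry with f=False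
--     if f and w1 not in w2 and len(w1) > len(w2):
--         w1, w2 = w2, w1
--     while True:
--         if w1 in w2:
--             return True
--         if len(w1) == len(w2) or len(w2) <= 2:
--             return False
--         i = w2.find(w1[0], 1)
--         if i == -1:
--             return False
--         w1, w2 = w1[1:], w2[i + 1:]
-- ===== Notes on version B (the rewrite author's own statement) =====
-- stated objective: alternative
-- what changed: A's tail recursion (with a swap re-entry carrying the flag) becomes an iterative while-True loop after a one-time swap, and A's manual index scan for the next matching character is replaced by str.find(w1[0], 1).
import Mathlib
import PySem

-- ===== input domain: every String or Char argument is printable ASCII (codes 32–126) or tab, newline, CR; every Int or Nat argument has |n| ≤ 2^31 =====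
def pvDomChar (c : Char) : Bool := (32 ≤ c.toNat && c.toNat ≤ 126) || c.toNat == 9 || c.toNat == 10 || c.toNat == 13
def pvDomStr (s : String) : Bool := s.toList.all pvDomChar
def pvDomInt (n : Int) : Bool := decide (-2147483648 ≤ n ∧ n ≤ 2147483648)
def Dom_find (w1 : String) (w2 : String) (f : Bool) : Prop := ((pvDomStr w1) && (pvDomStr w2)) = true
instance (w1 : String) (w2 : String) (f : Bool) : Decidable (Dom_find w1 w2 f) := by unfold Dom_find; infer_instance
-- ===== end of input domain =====

-- B replaces A's swap-recursion and tail recursion by a one-time swap followed by a while-loop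
-- that finds the next matching index with str.find(ch, 1) instead of A's manual index scan.

-- ===== PORT A =====
-- A's inner scan:  i = 1; while i < l2 and w1[0] != w2[i]: i += 1
def pvScanA (c : Char) (w2 : List Char) (i : Nat) : Nat :=
  if h : i < w2.length then
    if w2[i] != c then pvScanA c w2 (i + 1) else i
  else i
termination_by w2.length - i

def pvFindA (w1 w2 : List Char) (f : Bool) : Bool :=
  if PySem.Chars.isIn w1 w2 then true
  else if w1.length > w2.length ∧ f = true then pvFindA w2 w1 false
  else if w1.length = w2.length ∨ w2.length ≤ 2 then false
  else
    match hw : w1 with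
    | [] => false  -- unreachable: the empty string is a substring, so branch 1 fires
    | c :: t =>
      let i := pvScanA c w2 1
      (i != w2.length) && pvFindA (PySem.List.slice (c :: t) (some 1) none)
        (PySem.List.slice w2 (some ((i : Int) + 1)) none) false
termination_by 2 * (w1.length + w2.length) + (if f then 1 else 0)
decreasing_by
  · simp_all; omega
  · subst hw
    simp [PySem.List.slice_some_none]
    omega

-- ===== PORT B =====
-- B's while-True loop body (swap already done by find_alt)
def pvLoopB (w1 w2 : List Char) : Bool :=
  if PySem.Chars.isIn w1 w2 then true
  else if w1.length = w2.length ∨ w2.length ≤ 2 then false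
  else
    match hw : w1 with
    | [] => false  -- unreachable: the empty string is a substring, so branch 1 fires
    | c :: t =>
      let i := PySem.Chars.findFrom w2 [c] 1
      if i = -1 then false
      else pvLoopB (PySem.List.slice (c :: t) (some 1) none)
        (PySem.List.slice w2 (some (i + 1)) none)
termination_by w1.length + w2.length
decreasing_by
  subst hw
  simp [PySem.List.slice_some_none]
  omega

def find (w1 : String) (w2 : String) (f : Bool) : Bool :=
  pvFindA w1.toList w2.toList f

def find_alt (w1 : String) (w2 : String) (f : Bool) : Bool :=
  let a := w1.toList
  let b := w2.toList
  if f = true ∧ ¬ PySem.Chars.isIn a b ∧ b.length < a.length then pvLoopB b a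
  else pvLoopB a b

-- ===== PRECONDITION & SPEC =====
def Spec_find (w1 : String) (w2 : String) (f : Bool) (out : Bool) : Prop := out = find_alt w1 w2 f
instance (w1 : String) (w2 : String) (f : Bool) (out : Bool) : Decidable (Spec_find w1 w2 f out) := by unfold Spec_find; infer_instance

-- ===== CLAIM (what is proved, stated in full; the proofs are below) =====
def Claim_equal_find : Prop := ∀ (w1 : String) (w2 : String) (f : Bool), Dom_find w1 w2 f → Spec_find w1 w2 f (find w1 w2 f)

-- ===== LEMMAS AND PROOFS =====

theorem pvScanA_ge (c : Char) (w2 : List Char) (i : Nat) : i ≤ pvScanA c w2 i := by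
  fun_induction pvScanA <;> omega

theorem pvScanA_le (c : Char) (w2 : List Char) (i : Nat) (h : i ≤ w2.length) :
    pvScanA c w2 i ≤ w2.length := by
  fun_induction pvScanA <;> omega

theorem pvScanA_before (c : Char) (w2 : List Char) (i j : Nat) (hij : i ≤ j)
    (hj : j < pvScanA c w2 i) : w2[j]? ≠ some c := by
  fun_induction pvScanA with
  | case1 i h hne ih =>
    rcases Nat.eq_or_lt_of_le hij with rfl | hlt
    · simp_all
    · exact ih hlt hj
  | case2 i h hne => omega
  | case3 i h => omega

theorem pvScanA_hit (c : Char) (w2 : List Char) (i : Nat)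
    (h : pvScanA c w2 i < w2.length) : w2[pvScanA c w2 i]? = some c := by
  fun_induction pvScanA with
  | case1 i hlt hne ih => exact ih h
  | case2 i hlt hne =>
    simp only [bne_iff_ne, ne_eq, not_not] at hne
    simp [List.getElem?_eq_getElem hlt, hne]
  | case3 i hlt => omega

theorem singleton_prefix_iff (c : Char) (l : List Char) : [c] <+: l ↔ l.head? = some c := by
  cases l with
  | nil => simp
  | cons a t =>
    constructor
    · rintro ⟨s, hs⟩; simp at hs; simp [hs.1]
    · intro h; simp at h; exact ⟨t, by simp [h]⟩

theorem singleton_infix_iff (c : Char) (l : List Char) : [c] <:+: l ↔ c ∈ l := by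
  constructor
  · rintro ⟨s, t, h⟩; subst h; simp
  · intro h
    obtain ⟨s, t, rfl⟩ := List.append_of_mem h
    exact ⟨s, t, by simp⟩

-- bridge: A's manual scan computes exactly what w2.find(c, 1) computes
theorem scan_eq_findFrom_neg (c : Char) (w2 : List Char) (hl : 1 ≤ w2.length)
    (h : PySem.Chars.findFrom w2 [c] 1 none = -1) : pvScanA c w2 1 = w2.length := by
  have hni : ¬ [c] <:+: w2.drop 1 := by
    have h' := PySem.Chars.findFrom_natCast_eq_neg_one_iff w2 [c] 1 hl
    simp only [Nat.cast_one] at h'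
    exact h'.mp h
  rw [singleton_infix_iff] at hni
  have hle := pvScanA_le c w2 1 hl
  rcases Nat.eq_or_lt_of_le hle with h' | h'
  · exact h'
  · exfalso
    have hhit := pvScanA_hit c w2 1 h'
    have hge := pvScanA_ge c w2 1
    apply hni
    rw [List.mem_iff_getElem?]
    refine ⟨pvScanA c w2 1 - 1, ?_⟩
    rw [List.getElem?_drop]
    have : 1 + (pvScanA c w2 1 - 1) = pvScanA c w2 1 := by omega
    rw [this]; exact hhit

theorem scan_eq_findFrom_pos (c : Char) (w2 : List Char) (hl : 1 ≤ w2.length)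
    (h : PySem.Chars.findFrom w2 [c] 1 none ≠ -1) :
    pvScanA c w2 1 = (PySem.Chars.findFrom w2 [c] 1 none).toNat ∧
      (PySem.Chars.findFrom w2 [c] 1 none).toNat < w2.length := by
  obtain ⟨hge, hpre, hmin⟩ := PySem.Chars.findFrom_natCast_spec w2 [c] 1 hl h
  simp only [Nat.cast_one] at hge hpre hmin
  set r := (PySem.Chars.findFrom w2 [c] 1 none).toNat with hr
  have h1r : 1 ≤ r := by omega
  rw [singleton_prefix_iff, List.head?_drop] at hpre
  have hrlt : r < w2.length := by
    by_contra hc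
    rw [List.getElem?_eq_none (show w2.length ≤ r by omega)] at hpre
    simp at hpre
  refine ⟨?_, hrlt⟩
  have hle := pvScanA_le c w2 1 hl
  have hge1 := pvScanA_ge c w2 1
  rcases lt_trichotomy (pvScanA c w2 1) r with hlt | he | hgt
  · exfalso
    have hhit := pvScanA_hit c w2 1 (lt_trans hlt hrlt)
    have := hmin (pvScanA c w2 1) (by exact_mod_cast hge1) (by omega)
    rw [singleton_prefix_iff, List.head?_drop] at this
    exact this hhit
  · exact he
  · exfalso
    exact pvScanA_before c w2 1 r h1r hgt hpre

theorem findA_false_eq_loopB : ∀ (n : Nat) (w1 w2 : List Char),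
    w1.length + w2.length ≤ n → pvFindA w1 w2 false = pvLoopB w1 w2 := by
  intro n
  induction n with
  | zero =>
    intro w1 w2 h
    have h1 : w1 = [] := by cases w1 <;> simp_all
    have h2 : w2 = [] := by cases w2 <;> simp_all
    subst h1; subst h2
    rw [pvFindA.eq_def, pvLoopB.eq_def]
    simp [PySem.Chars.isIn]
  | succ n ih =>
    intro w1 w2 hn
    rw [pvFindA.eq_def, pvLoopB.eq_def]
    by_cases hin : PySem.Chars.isIn w1 w2
    · simp [hin]
    · rw [if_neg hin, if_neg hin,
        if_neg (show ¬ (w1.length > w2.length ∧ (false : Bool) = true) by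
          rintro ⟨-, h⟩; exact Bool.false_ne_true h)]
      by_cases heq : w1.length = w2.length ∨ w2.length ≤ 2
      · simp [heq]
      · simp only [heq, if_false]
        cases w1 with
        | nil => rfl
        | cons c t =>
          have hl : 1 ≤ w2.length := by omega
          by_cases hneg : PySem.Chars.findFrom w2 [c] 1 none = -1
          · have := scan_eq_findFrom_neg c w2 hl hneg
            simp [this, hneg]
          · obtain ⟨heqn, hlt⟩ := scan_eq_findFrom_pos c w2 hl hneg
            have hcast : ((pvScanA c w2 1 : Int) + 1) = PySem.Chars.findFrom w2 [c] 1 none + 1 := by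
              rw [heqn]
              have : (0:Int) ≤ PySem.Chars.findFrom w2 [c] 1 none := by
                obtain ⟨hge, _, _⟩ := PySem.Chars.findFrom_natCast_spec w2 [c] 1 hl hneg
                simp only [Nat.cast_one] at hge
                omega
              omega
            simp only [hneg, if_false, heqn]
            have hne : ((PySem.Chars.findFrom w2 [c] 1 none).toNat != w2.length) = true := by
              simp; omega
            rw [hne, Bool.true_and]
            rw [← heqn, hcast]
            apply ih
            have e1 : (PySem.List.slice (c :: t) (some 1) none).length = t.length := by
              rw [PySem.List.slice_from_one]; rfl
            have e2 : (PySem.List.slice w2 (some (PySem.Chars.findFrom w2 [c] 1 none + 1)) none).length ≤ w2.length := by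
              rw [PySem.List.slice_some_none, List.length_drop]; omega
            simp only [List.length_cons] at hn
            omega

theorem findA_f_eq_false (w1 w2 : List Char) (f : Bool)
    (hin : ¬ PySem.Chars.isIn w1 w2) (hsw : ¬ (w1.length > w2.length ∧ f = true)) :
    pvFindA w1 w2 f = pvFindA w1 w2 false := by
  rw [pvFindA.eq_def]
  conv_rhs => rw [pvFindA.eq_def]
  rw [if_neg hin, if_neg hin, if_neg hsw,
    if_neg (show ¬ (w1.length > w2.length ∧ (false : Bool) = true) by
      rintro ⟨-, h⟩; exact Bool.false_ne_true h)]

-- ===== VERDICT (by name: the statement is the Claim_ definition above) =====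
theorem find_spec : Claim_equal_find := by
  intro w1 w2 f _
  unfold Spec_find find find_alt
  set a := w1.toList
  set b := w2.toList
  by_cases hin : PySem.Chars.isIn a b
  · rw [if_neg (by tauto)]
    rw [pvFindA.eq_def, pvLoopB.eq_def]
    simp [hin]
  · by_cases hsw : f = true ∧ b.length < a.length
    · rw [if_pos ⟨hsw.1, hin, hsw.2⟩]
      rw [pvFindA.eq_def]
      rw [if_neg hin, if_pos ⟨hsw.2, hsw.1⟩]
      exact findA_false_eq_loopB (b.length + a.length) b a le_rfl
    · rw [if_neg (by tauto)]
      rw [findA_f_eq_false a b f hin (by intro ⟨h1, h2⟩; exact hsw ⟨h2, h1⟩)]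
      exact findA_false_eq_loopB (a.length + b.length) a b le_rfl
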